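-- pv_equiv track=rewrite | github.com/DalPra0/magicIA | treinamentoDoModelo.py | gerar_pares_perguntas_respostas
-- ===== SOURCE A (Python) =====
-- def gerar_pares_perguntas_respostas(cartas):
--     pares = []
--
--     for carta in cartas:
--         nome = carta.get('name')
--         tipo = carta.get('type_line')
--         habilidades = carta.get('oracle_text', 'Sem habilidades')
--         mana = carta.get('mana_cost', 'Sem custo de mana')
--         raridade = carta.get('rarity', 'Desconhecida')
--         colecao = carta.get('set_name', 'Desconhecida')
--
--         # Perguntas e respostas comuns
--         pares.append({
--             "pergunta": f"Qual é o tipo da carta {nome}?",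
--             "resposta": tipo
--         })
--         pares.append({
--             "pergunta": f"Quais são as habilidades da carta {nome}?",
--             "resposta": habilidades
--         })
--         pares.append({
--             "pergunta": f"Qual é o custo de mana da carta {nome}?",
--             "resposta": mana
--         })
--         pares.append({
--             "pergunta": f"Qual é a raridade da carta {nome}?",
--             "resposta": raridade
--         })
--         pares.append({
--             "pergunta": f"A carta {nome} pertence a qual coleção?",
--             "resposta": colecao
--         })
--
--     return pares
-- ===== SOURCE B (Python) =====
-- def gerar_pares_perguntas_respostas(cartas):
--     # Column-major strategy: build one list per question across ALL cards
--     # (five staged passes), then transpose back into the per-card order.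
--     def coluna(prefixo, sufixo, chave, padrao=None):
--         return [{"pergunta": prefixo + str(c.get('name')) + sufixo,
--                  "resposta": c.get(chave, padrao)} for c in cartas]
--
--     colunas = [
--         coluna("Qual é o tipo da carta ", "?", "type_line"),
--         coluna("Quais são as habilidades da carta ", "?", "oracle_text", "Sem habilidades"),
--         coluna("Qual é o custo de mana da carta ", "?", "mana_cost", "Sem custo de mana"),
--         coluna("Qual é a raridade da carta ", "?", "rarity", "Desconhecida"),
--         coluna("A carta ", " pertence a qual coleção?", "set_name", "Desconhecida"),
--     ]
--     return [par for linha in zip(*colunas) for par in linha]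
-- ===== Notes on version B (the rewrite author's own statement) =====
-- stated objective: alternative
-- what changed: B builds the answers column-major (one staged pass over all cards per question, five columns) and then transposes with zip back into per-card row order, instead of A's single pass appending five hardcoded dicts per card.
import Mathlib
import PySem

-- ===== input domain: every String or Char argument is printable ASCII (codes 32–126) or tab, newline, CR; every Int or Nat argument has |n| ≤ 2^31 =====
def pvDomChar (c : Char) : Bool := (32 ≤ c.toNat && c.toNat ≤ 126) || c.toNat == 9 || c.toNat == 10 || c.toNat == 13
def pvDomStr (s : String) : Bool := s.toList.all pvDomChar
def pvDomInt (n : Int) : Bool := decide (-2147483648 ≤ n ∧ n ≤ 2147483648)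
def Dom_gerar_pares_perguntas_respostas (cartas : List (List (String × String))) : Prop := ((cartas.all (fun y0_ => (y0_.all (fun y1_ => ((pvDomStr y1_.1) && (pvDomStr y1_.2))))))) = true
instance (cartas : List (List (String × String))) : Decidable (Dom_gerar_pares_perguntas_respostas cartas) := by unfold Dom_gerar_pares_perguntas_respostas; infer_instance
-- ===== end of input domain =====

-- B builds the answers column-major (one staged pass per question, five columns over all cards)
-- and transposes back into per-card order; A appends five hardcoded dicts per card in one pass.

-- dict.get(k) : first-match lookup in the association list
def pvGet (carta : List (String × String)) (k : String) : Option String :=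
  (carta.find? (fun kv => kv.1 == k)).map (fun kv => kv.2)

-- dict.get(k, d) with a string default
def pvGetD (carta : List (String × String)) (k d : String) : String :=
  (pvGet carta k).getD d

-- str(x) / f-string rendering of a possibly-None value
def pvFmt (o : Option String) : String :=
  match o with
  | none => "None"
  | some s => s

-- ===== PORT A =====
def gerar_pares_perguntas_respostas (cartas : List (List (String × String))) : List (List (String × Option String)) :=
  cartas.foldl (fun pares carta =>
    let nome := pvGet carta "name"
    let tipo := pvGet carta "type_line"
    let habilidades := pvGetD carta "oracle_text" "Sem habilidades"
    let mana := pvGetD carta "mana_cost" "Sem custo de mana"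
    let raridade := pvGetD carta "rarity" "Desconhecida"
    let colecao := pvGetD carta "set_name" "Desconhecida"
    let pares := pares ++ [[("pergunta", some ("Qual é o tipo da carta " ++ pvFmt nome ++ "?")), ("resposta", tipo)]]
    let pares := pares ++ [[("pergunta", some ("Quais são as habilidades da carta " ++ pvFmt nome ++ "?")), ("resposta", some habilidades)]]
    let pares := pares ++ [[("pergunta", some ("Qual é o custo de mana da carta " ++ pvFmt nome ++ "?")), ("resposta", some mana)]]
    let pares := pares ++ [[("pergunta", some ("Qual é a raridade da carta " ++ pvFmt nome ++ "?")), ("resposta", some raridade)]]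
    let pares := pares ++ [[("pergunta", some ("A carta " ++ pvFmt nome ++ " pertence a qual coleção?")), ("resposta", colecao)]]
    pares) []

-- ===== PORT B =====
-- coluna(prefixo, sufixo, chave, padrao): the Q&A pair for ONE question across ALL cards
def pvColuna (cartas : List (List (String × String))) (pre suf chave : String) (padrao : Option String) : List (List (String × Option String)) :=
  cartas.map (fun c =>
    [("pergunta", some (pre ++ pvFmt (pvGet c "name") ++ suf)),
     ("resposta", (pvGet c chave).or padrao)])

-- zip(*colunas) flattened: interleave the five equal-length columns row by row (truncates at the shortest, like zip)
def pvInterleave5 {α : Type} : List α → List α → List α → List α → List α → List α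
  | a :: as, b :: bs, c :: cs, d :: ds, e :: es => a :: b :: c :: d :: e :: pvInterleave5 as bs cs ds es
  | _, _, _, _, _ => []

def gerar_pares_perguntas_respostas_alt (cartas : List (List (String × String))) : List (List (String × Option String)) :=
  pvInterleave5
    (pvColuna cartas "Qual é o tipo da carta " "?" "type_line" none)
    (pvColuna cartas "Quais são as habilidades da carta " "?" "oracle_text" (some "Sem habilidades"))
    (pvColuna cartas "Qual é o custo de mana da carta " "?" "mana_cost" (some "Sem custo de mana"))
    (pvColuna cartas "Qual é a raridade da carta " "?" "rarity" (some "Desconhecida"))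
    (pvColuna cartas "A carta " " pertence a qual coleção?" "set_name" (some "Desconhecida"))

-- ===== PRECONDITION & SPEC =====
def Spec_gerar_pares_perguntas_respostas (cartas : List (List (String × String))) (out : List (List (String × Option String))) : Prop := out = gerar_pares_perguntas_respostas_alt cartas
instance (cartas : List (List (String × String))) (out : List (List (String × Option String))) : Decidable (Spec_gerar_pares_perguntas_respostas cartas out) := by unfold Spec_gerar_pares_perguntas_respostas; infer_instance

-- ===== CLAIM (what is proved, stated in full; the proofs are below) =====
def Claim_equal_gerar_pares_perguntas_respostas : Prop := ∀ (cartas : List (List (String × String))), Dom_gerar_pares_perguntas_respostas cartas → Spec_gerar_pares_perguntas_respostas cartas (gerar_pares_perguntas_respostas cartas)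

-- ===== LEMMAS AND PROOFS =====
-- interleaving five mapped columns is the flatMap of the five entries per element
theorem interleave5_map {α β : Type} (g1 g2 g3 g4 g5 : α → β) (xs : List α) :
    pvInterleave5 (xs.map g1) (xs.map g2) (xs.map g3) (xs.map g4) (xs.map g5) =
      xs.flatMap (fun x => [g1 x, g2 x, g3 x, g4 x, g5 x]) := by
  induction xs with
  | nil => rfl
  | cons x xs ih => simp [pvInterleave5, ih]

-- per-card: A's five appended dicts are exactly the five column entries for that card
theorem perCarta_eq (carta : List (String × String)) :
    [[("pergunta", some ("Qual é o tipo da carta " ++ pvFmt (pvGet carta "name") ++ "?")), ("resposta", pvGet carta "type_line")],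
     [("pergunta", some ("Quais são as habilidades da carta " ++ pvFmt (pvGet carta "name") ++ "?")), ("resposta", some (pvGetD carta "oracle_text" "Sem habilidades"))],
     [("pergunta", some ("Qual é o custo de mana da carta " ++ pvFmt (pvGet carta "name") ++ "?")), ("resposta", some (pvGetD carta "mana_cost" "Sem custo de mana"))],
     [("pergunta", some ("Qual é a raridade da carta " ++ pvFmt (pvGet carta "name") ++ "?")), ("resposta", some (pvGetD carta "rarity" "Desconhecida"))],
     [("pergunta", some ("A carta " ++ pvFmt (pvGet carta "name") ++ " pertence a qual coleção?")), ("resposta", some (pvGetD carta "set_name" "Desconhecida"))]] =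
    [[("pergunta", some ("Qual é o tipo da carta " ++ pvFmt (pvGet carta "name") ++ "?")), ("resposta", (pvGet carta "type_line").or none)],
     [("pergunta", some ("Quais são as habilidades da carta " ++ pvFmt (pvGet carta "name") ++ "?")), ("resposta", (pvGet carta "oracle_text").or (some "Sem habilidades"))],
     [("pergunta", some ("Qual é o custo de mana da carta " ++ pvFmt (pvGet carta "name") ++ "?")), ("resposta", (pvGet carta "mana_cost").or (some "Sem custo de mana"))],
     [("pergunta", some ("Qual é a raridade da carta " ++ pvFmt (pvGet carta "name") ++ "?")), ("resposta", (pvGet carta "rarity").or (some "Desconhecida"))],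
     [("pergunta", some ("A carta " ++ pvFmt (pvGet carta "name") ++ " pertence a qual coleção?")), ("resposta", (pvGet carta "set_name").or (some "Desconhecida"))]] := by
  simp only [pvGetD]
  cases pvGet carta "type_line" <;> cases pvGet carta "oracle_text" <;>
    cases pvGet carta "mana_cost" <;> cases pvGet carta "rarity" <;>
    cases pvGet carta "set_name" <;> simp [Option.getD, Option.or]

-- ===== VERDICT (by name: the statement is the Claim_ definition above) =====
theorem gerar_pares_perguntas_respostas_spec : Claim_equal_gerar_pares_perguntas_respostas := by
  intro cartas _
  unfold Spec_gerar_pares_perguntas_respostas gerar_pares_perguntas_respostas gerar_pares_perguntas_respostas_alt pvColuna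
  simp only [show ∀ (a b c d e : List (String × Option String)) (pares : List (List (String × Option String))),
      ((((pares ++ [a]) ++ [b]) ++ [c]) ++ [d]) ++ [e] = pares ++ [a,b,c,d,e] from by intros; simp]
  rw [PySem.List.foldl_append_eq_flatMap, interleave5_map]
  simp only [List.nil_append]
  congr 1
  funext carta
  exact perCarta_eq carta
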